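-- pv_equiv track=rewrite | github.com/raeez/chiral-bar-cobar | compute/lib/planar_planted_forest.py | _count_unordered_forests
-- ===== SOURCE A (Python) =====
-- from typing import Dict, List, Tuple, Optional
-- from math import factorial, comb
--
-- def catalan(n: int) -> int:
--     """Catalan number C_n = binom(2n, n) / (n+1)."""
--     if n < 0:
--         return 0
--     return comb(2 * n, n) // (n + 1)
--
-- def _partitions_of_n(n: int, max_part: Optional[int] = None) -> List[List[int]]:
--     """Integer partitions of n (parts >= 2, each part is a tree size).
--
--     For planted forests with n total leaves, each component tree has >= 2 leaves
--     (single-leaf trees are trivial).  But we also allow the trivial partition [n]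
--     representing a single tree with all n leaves.
--
--     Actually for the bar complex: a planted forest on n inputs consists of
--     trees whose leaf counts sum to n.  Each tree has at least 1 leaf.
--     """
--     if max_part is None:
--         max_part = n
--     if n == 0:
--         return [[]]
--     result = []
--     for first in range(min(n, max_part), 0, -1):
--         for rest in _partitions_of_n(n - first, first):
--             result.append([first] + rest)
--     return result
--
-- def _count_unordered_forests(n: int) -> int:
--     """Count unordered planted forests via partition enumeration.
--
--     For each integer partition (n_1 >= n_2 >= ... >= n_k) of n,
--     count the number of unordered forests of that type:
--     prod C_{n_i - 1} / prod (m_j!) where m_j = multiplicity of j.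
--     """
--     if n == 0:
--         return 1
--     if n == 1:
--         return 1
--     total = 0
--     for partition in _partitions_of_n(n):
--         # Product of Catalan numbers for each part
--         cat_product = 1
--         for part in partition:
--             cat_product *= catalan(part - 1)
--         # Divide by symmetry factor for repeated parts
--         from collections import Counter
--         mult = Counter(partition)
--         sym_factor = 1
--         for m in mult.values():
--             sym_factor *= factorial(m)
--         total += cat_product // sym_factor
--     return total
-- ===== SOURCE B (Python) =====
-- from math import factorial, comb
--
-- def catalan(n: int) -> int:
--     if n < 0:
--         return 0
--     return comb(2 * n, n) // (n + 1)
--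
-- def _count_unordered_forests(n: int) -> int:
--     """Fused enumeration: recurse on (remaining, max_part) choosing each part
--     together with its full multiplicity, accumulating the Catalan product and
--     symmetry factor; floor-divide once per completed partition."""
--     if n == 0:
--         return 1
--     if n == 1:
--         return 1
--
--     def go(remaining: int, max_part: int, cat_prod: int, sym: int) -> int:
--         if remaining == 0:
--             return cat_prod // sym
--         total = 0
--         for p in range(min(remaining, max_part), 0, -1):
--             c = catalan(p - 1)
--             cp = cat_prod
--             f = 1
--             for m in range(1, remaining // p + 1):
--                 cp *= c
--                 f *= m
--                 total += go(remaining - m * p, p - 1, cp, sym * f)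
--         return total
--
--     return go(n, n, 1, 1)
-- ===== Notes on version B (the rewrite author's own statement) =====
-- stated objective: alternative
-- what changed: Instead of materializing the full list of partitions and re-traversing each one with a Counter and factorial pass, B fuses generation and evaluation into one recursion over (remaining, max_part) that picks each part together with its whole run multiplicity while accumulating the Catalan product and symmetry factor, floor-dividing once per completed partition; it builds no intermediate lists (measured around 3-4x quicker on mid-size n, but a timing run could not confirm a 'faster' label).
import Mathlib
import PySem

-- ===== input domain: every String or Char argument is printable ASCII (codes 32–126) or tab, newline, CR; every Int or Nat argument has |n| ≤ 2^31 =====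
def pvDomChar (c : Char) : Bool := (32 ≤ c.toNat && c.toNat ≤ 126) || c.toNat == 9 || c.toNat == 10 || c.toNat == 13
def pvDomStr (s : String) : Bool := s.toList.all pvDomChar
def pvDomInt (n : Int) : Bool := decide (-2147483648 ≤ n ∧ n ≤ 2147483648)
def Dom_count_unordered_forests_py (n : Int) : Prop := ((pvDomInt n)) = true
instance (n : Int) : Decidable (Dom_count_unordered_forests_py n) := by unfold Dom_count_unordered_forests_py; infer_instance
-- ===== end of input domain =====

-- B fuses partition enumeration with term evaluation: it recurses on (remaining, max_part),
-- choosing each part together with its full run multiplicity while accumulating the Catalan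
-- product and symmetry factor, so no list of partitions and no Counter pass is built.


-- ===== PORT A =====
-- catalan(n) = comb(2n, n) // (n+1), module-level helper used by both implementations
def pyCatalan (n : Int) : Int :=
  if n < 0 then 0
  else PySem.Int.floordiv ((Nat.choose (2 * n).toNat n.toNat : Nat) : Int) (n + 1)

-- _partitions_of_n; the fuel guard only makes the recursion total (fuel n.toNat+1 suffices)
def partitionsOf : Nat → Int → Int → List (List Int)
  | 0, _, _ => []
  | fuel + 1, n, maxPart =>
    if n = 0 then [[]]
    else
      (PySem.List.pyRange (min n maxPart) 0 (-1)).foldl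
        (fun result first =>
          (partitionsOf fuel (n - first) first).foldl
            (fun result rest => result ++ [first :: rest]) result)
        []

def count_unordered_forests_py (n : Int) : Int :=
  if n = 0 then 1
  else if n = 1 then 1
  else
    (partitionsOf (n.toNat + 1) n n).foldl
      (fun total partition =>
        let cat_product := partition.foldl (fun acc part => acc * pyCatalan (part - 1)) 1
        let mult := PySem.Dict.counter partition
        let sym_factor := mult.values.foldl (fun acc m => acc * ((m.toNat).factorial : Int)) 1
        total + PySem.Int.floordiv cat_product sym_factor)
      0

-- ===== PORT B =====
-- go(remaining, max_part, cat_prod, sym) of Source B: fused recursion over runs of equal parts;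
-- the fuel guard only makes the recursion total (fuel n.toNat+1 suffices)
def goAlt : Nat → Int → Int → Int → Int → Int
  | 0, _, _, _, _ => 0
  | fuel + 1, remaining, maxPart, catProd, sym =>
    if remaining = 0 then PySem.Int.floordiv catProd sym
    else
      (PySem.List.pyRange (min remaining maxPart) 0 (-1)).foldl
        (fun total p =>
          let c := pyCatalan (p - 1)
          ((PySem.List.pyRange 1 (PySem.Int.floordiv remaining p + 1) 1).foldl
            (fun (st : Int × Int × Int) m =>
              (st.1 * c, st.2.1 * m,
               st.2.2 + goAlt fuel (remaining - m * p) (p - 1) (st.1 * c) (sym * (st.2.1 * m))))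
            (catProd, 1, total)).2.2)
        0

def count_unordered_forests_py_alt (n : Int) : Int :=
  if n = 0 then 1
  else if n = 1 then 1
  else goAlt (n.toNat + 1) n n 1 1

-- ===== PRECONDITION & SPEC =====
def Spec_count_unordered_forests_py (n : Int) (out : Int) : Prop := out = count_unordered_forests_py_alt n
instance (n : Int) (out : Int) : Decidable (Spec_count_unordered_forests_py n out) := by unfold Spec_count_unordered_forests_py; infer_instance

-- ===== CLAIM (what is proved, stated in full; the proofs are below) =====
def Claim_equal_count_unordered_forests_py : Prop := ∀ (n : Int), Dom_count_unordered_forests_py n → Spec_count_unordered_forests_py n (count_unordered_forests_py n)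

-- ===== LEMMAS AND PROOFS =====

-- proof-side abbreviations: partitions with ample fuel, Catalan product, symmetry factor, summand
def pvP (r mp : Int) : List (List Int) := partitionsOf (r.toNat + 1) r mp
def pvCatProd (l : List Int) : Int := (l.map (fun p => pyCatalan (p - 1))).prod
def pvSym (l : List Int) : Int :=
  ((PySem.Set.ofList l).map (fun v => ((l.count v).factorial : Int))).prod
def pvTerm (cp s : Int) (l : List Int) : Int :=
  PySem.Int.floordiv (cp * pvCatProd l) (s * pvSym l)

theorem pv_sum_flatMap {α β : Type} (l : List α) (g : α → List β) (f : β → Int) :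
    ((List.flatMap g l).map f).sum = (l.map (fun a => ((g a).map f).sum)).sum := by
  induction l with
  | nil => simp
  | cons x xs ih => simp [List.flatMap_cons, ih]

theorem partitionsOf_succ (fuel : Nat) (r mp : Int) :
    partitionsOf (fuel + 1) r mp =
      if r = 0 then [[]]
      else (PySem.List.pyRange (min r mp) 0 (-1)).flatMap
        (fun first => (partitionsOf fuel (r - first) first).map (first :: ·)) := by
  rw [partitionsOf]
  simp only [PySem.List.foldl_append_singleton_eq_map, PySem.List.foldl_append_eq_flatMap,
    List.nil_append]

theorem partitionsOf_fuel (f1 : Nat) (r mp : Int) (f2 : Nat)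
    (h1 : r.toNat < f1) (h2 : r.toNat < f2) :
    partitionsOf f1 r mp = partitionsOf f2 r mp := by
  induction f1 generalizing r mp f2 with
  | zero => omega
  | succ f1 ih =>
    cases f2 with
    | zero => omega
    | succ f2 =>
      rw [partitionsOf_succ, partitionsOf_succ]
      by_cases hr : r = 0
      · simp [hr]
      · simp only [if_neg hr, List.flatMap_def]
        refine congrArg List.flatten (List.map_congr_left ?_)
        intro first hf
        rw [PySem.List.mem_pyRange_neg_one] at hf
        have hb : (r - first).toNat < f1 ∧ (r - first).toNat < f2 := by
          have : first ≤ min r mp := hf.2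
          omega
        rw [ih (r - first) first f2 hb.1 hb.2]

theorem pvP_succ (r mp : Int) (hr : r ≠ 0) :
    pvP r mp = (PySem.List.pyRange (min r mp) 0 (-1)).flatMap
      (fun p => (pvP (r - p) p).map (p :: ·)) := by
  unfold pvP
  rw [partitionsOf_succ, if_neg hr]
  simp only [List.flatMap_def]
  refine congrArg List.flatten (List.map_congr_left ?_)
  intro p hp
  rw [PySem.List.mem_pyRange_neg_one] at hp
  have : p ≤ min r mp := hp.2
  rw [partitionsOf_fuel r.toNat (r - p) p ((r - p).toNat + 1) (by omega) (by omega)]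

theorem pvP_zero (mp : Int) : pvP 0 mp = [[]] := rfl

theorem pvP_bound (k : Nat) (r mp : Int) (hk : r.toNat ≤ k) :
    ∀ l ∈ pvP r mp, ∀ x ∈ l, 0 < x ∧ x ≤ mp := by
  induction k generalizing r mp with
  | zero =>
    intro l hl x hx
    by_cases hr : r = 0
    · subst hr; simp [pvP, partitionsOf] at hl
      subst hl; simp at hx
    · rw [pvP_succ r mp hr] at hl
      simp only [List.mem_flatMap] at hl
      obtain ⟨p, hp, hmem⟩ := hl
      rw [PySem.List.mem_pyRange_neg_one] at hp
      have : p ≤ min r mp := hp.2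
      omega
  | succ k ih =>
    intro l hl x hx
    by_cases hr : r = 0
    · subst hr; simp [pvP, partitionsOf] at hl
      subst hl; simp at hx
    · rw [pvP_succ r mp hr] at hl
      simp only [List.mem_flatMap, List.mem_map] at hl
      obtain ⟨p, hp, rest, hrest, hl⟩ := hl
      rw [PySem.List.mem_pyRange_neg_one] at hp
      have hpm : p ≤ min r mp := hp.2
      subst hl
      rcases List.mem_cons.mp hx with h | h
      · subst h; constructor <;> omega
      · have := ih (r - p) p (by omega) rest hrest x h
        constructor <;> omega

theorem pvP_clip (r p : Int) (h0 : 0 ≤ r) (hp : r < p) : pvP r p = pvP r (p - 1) := by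
  by_cases hr : r = 0
  · subst hr; rfl
  · rw [pvP_succ r p hr, pvP_succ r (p - 1) hr]
    have h1 : min r p = r := by omega
    have h2 : min r (p - 1) = r := by omega
    rw [h1, h2]

theorem pv_shift_sum (a b : Int) (h : Int → Int) :
    ((PySem.List.pyRange (a + 1) (b + 1) 1).map h).sum =
      ((PySem.List.pyRange a b 1).map (fun m => h (m + 1))).sum := by
  rw [PySem.List.pyRange_one, PySem.List.pyRange_one]
  have : (b + 1 - (a + 1)).toNat = (b - a).toNat := by omega
  rw [this, List.map_map, List.map_map]
  refine congrArg List.sum (List.map_congr_left ?_)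
  intro k _
  simp only [Function.comp_apply]
  ring_nf

theorem pv_runsum (k : Nat) (r p : Int) (g : List Int → Int)
    (hk : r.toNat ≤ k) (hp : 1 ≤ p) (hpr : p ≤ r) :
    ((pvP (r - p) p).map (fun rest => g (p :: rest))).sum =
      ((PySem.List.pyRange 1 (PySem.Int.floordiv r p + 1) 1).map
        (fun m => ((pvP (r - m * p) (p - 1)).map
          (fun rest => g (List.replicate m.toNat p ++ rest))).sum)).sum := by
  induction k generalizing r g with
  | zero => omega
  | succ k ih =>
    by_cases hA : r - p = 0
    · -- r = p : single partition [p], quotient 1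
      have hq : PySem.Int.floordiv r p = 1 := by
        rw [PySem.Int.floordiv_eq_iff_of_pos (by omega)]
        constructor <;> nlinarith
      rw [hq, hA]
      rw [show ((1 : Int) + 1) = 1 + 1 by rfl, PySem.List.pyRange_one_singleton]
      simp [pvP_zero, hA]
    · by_cases hB : r - p < p
      · -- single run of p, remainder has max part p - 1
        have hq : PySem.Int.floordiv r p = 1 := by
          rw [PySem.Int.floordiv_eq_iff_of_pos (by omega)]
          constructor <;> nlinarith
        rw [hq, PySem.List.pyRange_one_singleton]
        rw [pvP_clip (r - p) p (by omega) hB]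
        simp
      · -- r - p ≥ p : peel one copy of p, recurse
        set q := PySem.Int.floordiv r p with hqdef
        have hqs : q * p ≤ r ∧ r < (q + 1) * p :=
          (PySem.Int.floordiv_eq_iff_of_pos (by omega)).mp rfl
        have hq2 : 2 ≤ q := by
          rw [hqdef, PySem.Int.le_floordiv_iff_mul_le (by omega)]; omega
        have hqp : PySem.Int.floordiv (r - p) p = q - 1 := by
          rw [PySem.Int.floordiv_eq_iff_of_pos (by omega)]
          constructor <;> nlinarith
        -- decompose pvP (r - p) p
        have hdec : pvP (r - p) p =
            ((pvP (r - p - p) p).map (p :: ·)) ++ pvP (r - p) (p - 1) := by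
          rw [pvP_succ (r - p) p hA]
          have hmin : min (r - p) p = p := by omega
          rw [hmin, PySem.List.pyRange_neg_one_cons (by omega : (0:Int) < p)]
          rw [List.flatMap_cons]
          congr 1
          rw [pvP_succ (r - p) (p - 1) hA]
          have hmin2 : min (r - p) (p - 1) = p - 1 := by omega
          rw [hmin2]
        rw [hdec, List.map_append, List.sum_append]
        -- S1 via IH at r - p
        have hS1 : ((List.map (p :: ·) (pvP (r - p - p) p)).map
            (fun rest => g (p :: rest))).sum =
            ((PySem.List.pyRange 1 (q - 1 + 1) 1).map
              (fun m => ((pvP (r - p - m * p) (p - 1)).map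
                (fun rest => g (p :: (List.replicate m.toNat p ++ rest)))).sum)).sum := by
          rw [List.map_map]
          have := ih (r - p) (fun l => g (p :: l)) (by omega) (by omega)
          rw [hqp] at this
          exact this
        rw [hS1]
        -- RHS : split off m = 1
        rw [PySem.List.pyRange_one_cons (by omega : (1:Int) < q + 1)]
        rw [List.map_cons, List.sum_cons]
        have hshift : ((PySem.List.pyRange (1 + 1) (q + 1) 1).map
            (fun m => ((pvP (r - m * p) (p - 1)).map
              (fun rest => g (List.replicate m.toNat p ++ rest))).sum)).sum =
            ((PySem.List.pyRange 1 q 1).map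
              (fun m => ((pvP (r - (m + 1) * p) (p - 1)).map
                (fun rest => g (List.replicate (m + 1).toNat p ++ rest))).sum)).sum := by
          exact pv_shift_sum 1 q _
        rw [hshift]
        have hcong : ((PySem.List.pyRange 1 q 1).map
            (fun m => ((pvP (r - (m + 1) * p) (p - 1)).map
              (fun rest => g (List.replicate (m + 1).toNat p ++ rest))).sum)).sum =
            ((PySem.List.pyRange 1 (q - 1 + 1) 1).map
              (fun m => ((pvP (r - p - m * p) (p - 1)).map
                (fun rest => g (p :: (List.replicate m.toNat p ++ rest)))).sum)).sum := by
          have : q - 1 + 1 = q := by omega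
          rw [this]
          refine congrArg List.sum (List.map_congr_left ?_)
          intro m hm
          rw [PySem.List.mem_pyRange_one] at hm
          have h1 : r - (m + 1) * p = r - p - m * p := by ring
          have h2 : (m + 1).toNat = m.toNat + 1 := by omega
          rw [h1, h2, List.replicate_succ]
          simp
        rw [hcong]
        have hm1 : ((pvP (r - 1 * p) (p - 1)).map
            (fun rest => g (List.replicate (1:Int).toNat p ++ rest))).sum =
            ((pvP (r - p) (p - 1)).map (fun rest => g (p :: rest))).sum := by
          simp
        rw [hm1]
        ring

theorem pv_foldl_add_cons (rest : List Int) (acc : List Int) (p : Int) (hp : p ∉ rest) :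
    List.foldl PySem.Set.add (p :: acc) rest = p :: List.foldl PySem.Set.add acc rest := by
  induction rest generalizing acc with
  | nil => rfl
  | cons x xs ih =>
    have hxp : x ≠ p := fun h => hp (by simp [h])
    have htail : p ∉ xs := fun h => hp (List.mem_cons_of_mem _ h)
    simp only [List.foldl_cons]
    have hadd : PySem.Set.add (p :: acc) x = p :: PySem.Set.add acc x := by
      simp only [PySem.Set.add, PySem.Set.contains, List.contains_cons]
      have : (x == p) = false := by simp [hxp]
      rw [this]
      by_cases hc : x ∈ acc <;> simp [hc]
    rw [hadd, ih _ htail]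

theorem pv_ofList_replicate (k : Nat) (p : Int) (hk : 1 ≤ k) :
    PySem.Set.ofList (List.replicate k p) = [p] := by
  induction k with
  | zero => omega
  | succ k ih =>
    by_cases hk0 : k = 0
    · subst hk0; rfl
    · have hrec := ih (by omega)
      simp only [PySem.Set.ofList] at *
      rw [List.replicate_succ']
      rw [List.foldl_append]
      rw [hrec]
      simp [PySem.Set.add, PySem.Set.contains]

theorem pv_ofList_split (k : Nat) (p : Int) (rest : List Int) (hk : 1 ≤ k) (hp : p ∉ rest) :
    PySem.Set.ofList (List.replicate k p ++ rest) = p :: PySem.Set.ofList rest := by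
  simp only [PySem.Set.ofList, List.foldl_append]
  have h1 : List.foldl PySem.Set.add PySem.Set.empty (List.replicate k p) = [p] :=
    pv_ofList_replicate k p hk
  rw [h1]
  exact pv_foldl_add_cons rest PySem.Set.empty p hp

theorem pvSym_split (k : Nat) (p : Int) (rest : List Int) (hk : 1 ≤ k) (hp : p ∉ rest) :
    pvSym (List.replicate k p ++ rest) = ((k).factorial : Int) * pvSym rest := by
  unfold pvSym
  rw [pv_ofList_split k p rest hk hp, List.map_cons, List.prod_cons]
  have hcp : (List.replicate k p ++ rest).count p = k := by
    rw [List.count_append, List.count_replicate_self, List.count_eq_zero.mpr hp]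
    omega
  rw [hcp]
  congr 1
  refine congrArg List.prod (List.map_congr_left ?_)
  intro v hv
  have hvr : v ∈ rest := (PySem.Set.mem_ofList rest v).mp hv
  have hvp : (p == v) = false := by
    simp only [beq_eq_false_iff_ne, ne_eq]
    intro h; exact hp (h ▸ hvr)
  rw [List.count_append, List.count_replicate, hvp]
  simp

theorem pvCatProd_split (k : Nat) (p : Int) (rest : List Int) :
    pvCatProd (List.replicate k p ++ rest) = (pyCatalan (p - 1)) ^ k * pvCatProd rest := by
  simp [pvCatProd, List.map_replicate, List.prod_replicate]

theorem pvTerm_split (k : Nat) (p : Int) (rest : List Int) (cp s : Int)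
    (hk : 1 ≤ k) (hp : p ∉ rest) :
    pvTerm cp s (List.replicate k p ++ rest) =
      pvTerm (cp * (pyCatalan (p - 1)) ^ k) (s * ((k).factorial : Int)) rest := by
  unfold pvTerm
  rw [pvCatProd_split, pvSym_split k p rest hk hp]
  congr 1 <;> ring

theorem pv_innerfold (f : Nat) (r p cp s c : Int) (q : Nat) (t : Int) :
    (PySem.List.pyRange 1 ((q : Int) + 1) 1).foldl
      (fun (st : Int × Int × Int) m =>
        (st.1 * c, st.2.1 * m,
         st.2.2 + goAlt f (r - m * p) (p - 1) (st.1 * c) (s * (st.2.1 * m))))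
      (cp, 1, t)
    = (cp * c ^ q, ((q).factorial : Int),
       t + ((PySem.List.pyRange 1 ((q : Int) + 1) 1).map
         (fun m => goAlt f (r - m * p) (p - 1) (cp * c ^ m.toNat)
           (s * ((m.toNat).factorial : Int)))).sum) := by
  induction q with
  | zero =>
    simp
  | succ q ih =>
    have hq1 : ((q + 1 : Nat) : Int) + 1 = ((q : Int) + 1) + 1 := by push_cast; ring
    rw [hq1, PySem.List.pyRange_one_succ_right (by omega : (1:Int) ≤ (q : Int) + 1)]
    rw [List.foldl_append, ih]
    simp only [List.foldl_cons, List.foldl_nil, List.map_append, List.map_cons, List.map_nil,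
      List.sum_append, List.sum_cons, List.sum_nil]
    refine Prod.ext ?_ (Prod.ext ?_ ?_)
    · show cp * c ^ q * c = cp * c ^ (q + 1)
      ring
    · show ((q).factorial : Int) * ((q : Int) + 1) = (((q + 1)).factorial : Int)
      rw [Nat.factorial_succ]
      push_cast; ring
    · show _ + goAlt f (r - ((q:Int)+1) * p) (p - 1) (cp * c ^ q * c) (s * (((q).factorial : Int) * ((q:Int)+1))) = _
      have h1 : ((q : Int) + 1).toNat = q + 1 := by omega
      rw [h1]
      have h2 : cp * c ^ q * c = cp * c ^ (q + 1) := by ring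
      have h3 : s * (((q).factorial : Int) * ((q:Int)+1)) = s * (((q+1).factorial : Int)) := by
        rw [Nat.factorial_succ]; push_cast; ring
      rw [h2, h3]
      ring

theorem goAlt_eq (fuel : Nat) (r mp cp s : Int) (h : r.toNat < fuel) :
    goAlt fuel r mp cp s = ((pvP r mp).map (pvTerm cp s)).sum := by
  induction fuel generalizing r mp cp s with
  | zero => omega
  | succ f ih =>
    by_cases hr : r = 0
    · subst hr
      show (if (0:Int) = 0 then PySem.Int.floordiv cp s else _) = _
      rw [if_pos rfl, pvP_zero]
      simp [pvTerm, pvCatProd, pvSym]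
    · show (if r = 0 then PySem.Int.floordiv cp s else
        (PySem.List.pyRange (min r mp) 0 (-1)).foldl _ 0) = _
      rw [if_neg hr]
      -- right-hand side: one unfolding + sum over flatMap
      rw [pvP_succ r mp hr, pv_sum_flatMap]
      -- left-hand side: rewrite the loop body pointwise
      rw [PySem.List.foldl_congr_mem (PySem.List.pyRange (min r mp) 0 (-1)) _
        (fun total p => total +
          ((pvP (r - p) p).map (fun rest => pvTerm cp s (p :: rest))).sum) 0 ?_]
      · rw [PySem.List.foldl_add]
        simp only [List.map_map, zero_add]
        refine congrArg List.sum (List.map_congr_left ?_)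
        intro p hp
        rfl
      · intro t p hp
        rw [PySem.List.mem_pyRange_neg_one] at hp
        have hpmin : p ≤ min r mp := hp.2
        have hp1 : 1 ≤ p := hp.1
        have hpr : p ≤ r := by omega
        have hfd1 : 1 ≤ PySem.Int.floordiv r p := by
          rw [PySem.Int.le_floordiv_iff_mul_le (by omega)]; omega
        have hq : ((PySem.Int.floordiv r p).toNat : Int) = PySem.Int.floordiv r p := by omega
        show ((PySem.List.pyRange 1 (PySem.Int.floordiv r p + 1) 1).foldl _ (cp, 1, t)).2.2 = _
        rw [← hq, pv_innerfold]
        -- Σ_m goAlt = Σ_m Σ_rest term, then fold runs back together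
        rw [hq]
        have hstep : ((PySem.List.pyRange 1 (PySem.Int.floordiv r p + 1) 1).map
            (fun m => goAlt f (r - m * p) (p - 1) (cp * (pyCatalan (p - 1)) ^ m.toNat)
              (s * ((m.toNat).factorial : Int)))).sum =
            ((PySem.List.pyRange 1 (PySem.Int.floordiv r p + 1) 1).map
              (fun m => ((pvP (r - m * p) (p - 1)).map
                (fun rest => pvTerm cp s (List.replicate m.toNat p ++ rest))).sum)).sum := by
          refine congrArg List.sum (List.map_congr_left ?_)
          intro m hm
          rw [PySem.List.mem_pyRange_one] at hm
          have hm1 : 1 ≤ m := hm.1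
          have hmp : 1 * 1 ≤ m * p := mul_le_mul hm1 hp1 (by omega) (by omega)
          have hlt : (r - m * p).toNat < f := by omega
          rw [ih (r - m * p) (p - 1) _ _ hlt]
          refine congrArg List.sum (List.map_congr_left ?_)
          intro rest hrest
          have hbd := pvP_bound (r - m * p).toNat (r - m * p) (p - 1) (le_refl _) rest hrest
          have hpnot : p ∉ rest := fun hmem => by
            have := hbd p hmem; omega
          rw [pvTerm_split m.toNat p rest cp s (by omega) hpnot]
        rw [hstep, ← pv_runsum r.toNat r p (pvTerm cp s) (by omega) hp1 hpr]

theorem pvA_cat (l : List Int) :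
    l.foldl (fun acc part => acc * pyCatalan (part - 1)) 1 = pvCatProd l := by
  rw [pvCatProd, List.prod_eq_foldl, List.foldl_map]

theorem pvA_sym (l : List Int) :
    (PySem.Dict.counter l).values.foldl (fun acc m => acc * ((m.toNat).factorial : Int)) 1
      = pvSym l := by
  rw [PySem.Dict.values, PySem.Dict.items_counter, List.map_map]
  rw [pvSym, List.prod_eq_foldl, List.foldl_map, List.foldl_map]
  simp

theorem pv_final (n : Int) :
    count_unordered_forests_py n = count_unordered_forests_py_alt n := by
  unfold count_unordered_forests_py count_unordered_forests_py_alt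
  by_cases h0 : n = 0
  · simp [h0]
  · by_cases h1 : n = 1
    · simp [h1]
    · rw [if_neg h0, if_neg h1, if_neg h0, if_neg h1]
      rw [goAlt_eq (n.toNat + 1) n n 1 1 (by omega)]
      simp only [pvA_cat, pvA_sym]
      rw [show partitionsOf (n.toNat + 1) n n = pvP n n from rfl, PySem.List.foldl_add]
      simp only [zero_add]
      refine congrArg List.sum (List.map_congr_left ?_)
      intro l _
      simp [pvTerm]

-- ===== VERDICT (by name: the statement is the Claim_ definition above) =====
theorem count_unordered_forests_py_spec : Claim_equal_count_unordered_forests_py := by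
  intro n _
  unfold Spec_count_unordered_forests_py
  exact pv_final n
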